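-- pv_equiv track=rewrite | github.com/Simonmaignan/leetcode | microsoft-oa/Ex2.py | solution
-- ===== SOURCE A (Python) =====
-- from typing import List
--
-- def solution(S: str) -> int:
--     n = len(S)
--     # Transform into list since string is immutable
--     s_list: List[str] = list(S)
--
--     # Count leading 0s
--     leading_0s = 0
--     while leading_0s < n and s_list[leading_0s] == "0":
--         leading_0s += 1
--
--     nb_op = 0
--     # Until were're before last non leading 0 bit
--     while len(s_list) > leading_0s + 1:
--         lsb: str = s_list.pop()
--         # Divide by 2
--         if lsb == "0":
--             nb_op += 1
--         # Minus 1 then divide by 2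
--         else:
--             nb_op += 2
--     # Minus 1
--     if s_list[-1] == "1":
--         nb_op += 1
--
--     return nb_op
-- ===== SOURCE B (Python) =====
-- def solution(S: str) -> int:
--     # Closed form: strip leading zeros; each remaining char costs one pop-step
--     # (1 op if '0', 2 ops otherwise) except the last kept char, which costs
--     # 1 extra op only if it is '1'.
--     t = S.lstrip("0")
--     if not t:
--         return 0
--     return 2 * len(t) - t.count("0") - 2 + (t[0] == "1")
-- ===== Notes on version B (the rewrite author's own statement) =====
-- stated objective: faster
-- what changed: Replaces A's pop-one-character-per-iteration simulation loop with a closed-form expression over the string stripped of leading zeros (each remaining char costs 1 op if it is a zero else 2, with an adjustment for the last kept char).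
-- crash fix: On the empty string A raises IndexError when it reads the last element of the emptied list; B returns 0. — e.g. on solution(""): A raises IndexError, B returns 0
import Mathlib
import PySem

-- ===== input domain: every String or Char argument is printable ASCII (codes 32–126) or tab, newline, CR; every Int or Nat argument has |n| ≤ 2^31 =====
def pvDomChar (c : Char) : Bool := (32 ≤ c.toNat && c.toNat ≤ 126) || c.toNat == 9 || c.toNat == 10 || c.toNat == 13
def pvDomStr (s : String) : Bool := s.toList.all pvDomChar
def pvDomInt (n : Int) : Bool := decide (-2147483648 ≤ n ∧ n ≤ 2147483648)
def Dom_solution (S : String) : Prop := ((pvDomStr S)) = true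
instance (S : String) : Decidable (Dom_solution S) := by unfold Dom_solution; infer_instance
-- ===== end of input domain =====

-- B replaces A's pop-one-bit-at-a-time loop with a closed form over the stripped string.
-- Return-value equivalence only; A copies S into a list, neither mutates its argument.

-- ===== PORT A =====
-- leading-zeros counting loop: 'while leading_0s < n and s_list[leading_0s] == "0"'
def solutionLead0 : List Char → Int
  | [] => 0
  | c :: rest => if c = '0' then 1 + solutionLead0 rest else 0

-- main loop: 'while len(s_list) > leading_0s + 1: lsb = s_list.pop(); …'
def solutionLoop (z : Int) (s : List Char) (nb : Int) : List Char × Int :=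
  if (s.length : Int) > z + 1 then
    match hm : s.getLast? with
    | none => (s, nb)  -- 's_list.pop()' on an empty list raises; unreachable for the 0 ≤ z the caller passes
    | some lsb => solutionLoop z s.dropLast (if lsb = '0' then nb + 1 else nb + 2)
  else (s, nb)
termination_by s.length
decreasing_by
  have : s ≠ [] := by intro he; subst he; simp at hm
  simpa using Nat.sub_lt (List.length_pos_iff.mpr this) one_pos

def solution (S : String) : Int :=
  let s_list := S.toList
  let leading_0s := solutionLead0 s_list
  let r := solutionLoop leading_0s s_list 0
  -- reading the last element raises IndexError on the empty list (only reachable for S = ""),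
  -- which Pre_solution excludes; getLast? = pyGet? s (-1).
  r.2 + (if r.1.getLast? = some '1' then 1 else 0)

-- ===== PORT B =====
-- S.lstrip("0") is exactly dropWhile (= '0') on the code points (ASCII domain).
def solution_alt (S : String) : Int :=
  let t := S.toList.dropWhile (fun c => c = '0')
  if t = [] then 0
  else 2 * (t.length : Int) - (t.count '0' : Int) - 2
       + (if t.head? = some '1' then 1 else 0)

-- ===== PRECONDITION & SPEC =====
-- A raises IndexError (reading the last element of the list) exactly when S is empty.
def Pre_solution (S : String) : Prop := S ≠ ""
instance (S : String) : Decidable (Pre_solution S) := by unfold Pre_solution; infer_instance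
def pvWitness_solution : String := "0110"

def Spec_solution (S : String) (out : Int) : Prop := out = solution_alt S
instance (S : String) (out : Int) : Decidable (Spec_solution S out) := by unfold Spec_solution; infer_instance

-- On the empty string A raises IndexError when it reads the last element of the emptied list; B returns 0.
def Raises_solution (S : String) : Prop := S = ""
instance (S : String) : Decidable (Raises_solution S) := by unfold Raises_solution; infer_instance
def pvRaiseWitness_solution : String := ""
def pvRaiseWitnessOut_solution : Int := 0

-- ===== CLAIM (what is proved, stated in full; the proofs are below) =====
def Claim_equal_solution : Prop := ∀ (S : String), Dom_solution S → Pre_solution S → Spec_solution S (solution S)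
def Claim_raises_solution : Prop := (∀ (S : String), Dom_solution S → Raises_solution S → ¬ Pre_solution S) ∧ (Dom_solution (pvRaiseWitness_solution) ∧ Raises_solution (pvRaiseWitness_solution) ∧ solution_alt (pvRaiseWitness_solution) = pvRaiseWitnessOut_solution)

-- ===== LEMMAS AND PROOFS =====

-- cost of popping one char
def popCost (c : Char) : Int := if c = '0' then 1 else 2

lemma costSum_eq (u : List Char) :
    (u.map popCost).sum = 2 * (u.length : Int) - (u.count '0' : Int) := by
  induction u with
  | nil => simp
  | cons c u ih =>
    simp [popCost, List.count_cons, ih]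
    by_cases h : c = '0' <;> simp [h] <;> ring

lemma solutionLoop_eq (z : Int) (hz : 0 ≤ z) (s : List Char) (nb : Int)
    (h : z + 1 ≤ (s.length : Int)) :
    solutionLoop z s nb =
      (s.take (z + 1).toNat, nb + ((s.drop (z + 1).toNat).map popCost).sum) := by
  induction s using List.reverseRecOn generalizing nb with
  | nil => simp at h; omega
  | append_singleton s' c ih =>
    rw [solutionLoop]
    by_cases hgt : ((s' ++ [c]).length : Int) > z + 1
    · rw [if_pos hgt]
      have hlen : z + 1 ≤ (s'.length : Int) := by simp at hgt; omega
      have hle : (z + 1).toNat ≤ s'.length := by omega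
      have hg : (s' ++ [c]).getLast? = some c := by simp
      rw [hg]
      simp only [List.dropLast_concat]
      rw [ih _ hlen]
      have ht : (s' ++ [c]).take (z + 1).toNat = s'.take (z + 1).toNat := by
        rw [List.take_append_of_le_length hle]
      have hd : (s' ++ [c]).drop (z + 1).toNat = s'.drop (z + 1).toNat ++ [c] := by
        rw [List.drop_append_of_le_length hle]
      rw [ht, hd]
      simp [popCost]
      by_cases hc : c = '0' <;> simp [hc] <;> ring
    · rw [if_neg hgt]
      have hlen : (s' ++ [c]).length = (z + 1).toNat := by
        simp only [List.length_append, List.length_cons, List.length_nil] at hgt h ⊢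
        omega
      rw [List.take_of_length_le (le_of_eq hlen), List.drop_of_length_le (le_of_eq hlen)]
      simp

lemma lead0_eq (l : List Char) :
    solutionLead0 l = ((l.takeWhile (fun c => c = '0')).length : Int) := by
  induction l with
  | nil => simp [solutionLead0]
  | cons c rest ih =>
    by_cases h : c = '0' <;> simp [solutionLead0, h, ih]
    omega

lemma solution_main (l : List Char) (hlne : l ≠ []) :
    (solutionLoop (solutionLead0 l) l 0).2
      + (if (solutionLoop (solutionLead0 l) l 0).1.getLast? = some '1' then (1:Int) else 0)
    = (if l.dropWhile (fun c => c = '0') = [] then 0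
       else 2 * ((l.dropWhile (fun c => c = '0')).length : Int)
            - ((l.dropWhile (fun c => c = '0')).count '0' : Int) - 2
            + (if (l.dropWhile (fun c => c = '0')).head? = some '1' then 1 else 0)) := by
  set zs := l.takeWhile (fun c => c = '0') with hzs
  set t := l.dropWhile (fun c => c = '0') with ht
  have hsplit : zs ++ t = l := List.takeWhile_append_dropWhile
  rw [lead0_eq l]
  by_cases htn : t = []
  · -- all zeros: loop body never runs, last char is '0'
    have hlz : l = zs := by rw [← hsplit, htn, List.append_nil]
    have hloop : solutionLoop (zs.length : Int) l 0 = (l, 0) := by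
      rw [solutionLoop, if_neg]
      rw [hlz]; omega
    rw [hloop]
    have hall : ∀ c ∈ l, c = '0' := by
      intro c hc
      rw [hlz, hzs] at hc
      have := List.mem_takeWhile_imp hc
      simpa using this
    have hlast : l.getLast? = some '0' := by
      rw [List.getLast?_eq_some_getLast hlne]
      exact congrArg some (hall _ (List.getLast_mem hlne))
    rw [hlast]
    simp [htn]
  · -- significant part t = c :: u
    obtain ⟨c, u, hcu⟩ := List.exists_cons_of_ne_nil htn
    have hc0 : ¬ (c = '0') := by
      have hh := List.head?_dropWhile_not (fun c => decide (c = '0')) l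
      rw [← ht, hcu] at hh
      simp at hh
      exact hh
    have hlen : (zs.length : Int) + 1 ≤ (l.length : Int) := by
      have hx : l.length = zs.length + t.length := by
        rw [← hsplit, List.length_append]
      rw [hcu] at hx
      simp at hx
      omega
    have htoNat : ((zs.length : Int) + 1).toNat = zs.length + 1 := by omega
    rw [solutionLoop_eq _ (by positivity) _ _ hlen, htoNat]
    have htake : l.take (zs.length + 1) = zs ++ [c] := by
      rw [← hsplit, hcu, List.take_append]
      simp
    have hdrop : l.drop (zs.length + 1) = u := by
      rw [← hsplit, hcu, List.drop_append]
      simp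
    rw [htake, hdrop, if_neg htn, hcu]
    have hlastzc : (zs ++ [c]).getLast? = some c := by simp
    rw [hlastzc]
    have hcount : ((c :: u).count '0' : Int) = (u.count '0' : Int) := by
      rw [List.count_cons]
      simp [Ne.symm, hc0]
    rw [costSum_eq, hcount]
    simp only [List.head?_cons, List.length_cons]
    push_cast
    by_cases h1 : c = '1' <;> simp [h1] <;> ring

-- ===== VERDICT (by name: the statement is the Claim_ definition above) =====
theorem solution_spec : Claim_equal_solution := by
  intro S _ hpre
  have hlne : S.toList ≠ [] := by
    intro he
    exact hpre (by rwa [← String.toList_eq_nil_iff])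
  unfold Spec_solution
  have h := solution_main S.toList hlne
  show solution S = solution_alt S
  unfold solution solution_alt
  exact h

@[simp] theorem solution_raises : Claim_raises_solution := by
  unfold Claim_raises_solution
  exact ⟨fun S _ hr hp => hp hr, by decide⟩
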